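-- pv_equiv track=rewrite | github.com/sqoshi/metaheuristic-alghoritms | List_01/z3/z3.py | removeConsts
-- ===== SOURCE A (Python) =====
-- def removeConsts(neighbours):
--     neighboursAsString = []
--     for n in neighbours:
--         z = ''.join([el for el in n])
--         while "UD" in z or "DU" in z or "LR" in z or "RL" in z:
--             z = z.replace("UD", "")
--             z = z.replace("DU", "")
--             z = z.replace("LR", "")
--             z = z.replace("RL", "")
--         neighboursAsString.append(list(z))
--     return neighboursAsString
-- ===== SOURCE B (Python) =====
-- def removeConsts(neighbours):
--     inv = {'U': 'D', 'D': 'U', 'L': 'R', 'R': 'L'}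
--     out = []
--     for n in neighbours:
--         stack = []
--         for ch in ''.join(n):
--             if stack and inv.get(stack[-1]) == ch:
--                 stack.pop()
--             else:
--                 stack.append(ch)
--         out.append(stack)
--     return out
-- ===== Notes on version B (the rewrite author's own statement) =====
-- stated objective: alternative
-- what changed: replaced the repeated whole-string replace() fixpoint loop with a single-pass stack that pops when the incoming move is the inverse of the stack top
import Mathlib
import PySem

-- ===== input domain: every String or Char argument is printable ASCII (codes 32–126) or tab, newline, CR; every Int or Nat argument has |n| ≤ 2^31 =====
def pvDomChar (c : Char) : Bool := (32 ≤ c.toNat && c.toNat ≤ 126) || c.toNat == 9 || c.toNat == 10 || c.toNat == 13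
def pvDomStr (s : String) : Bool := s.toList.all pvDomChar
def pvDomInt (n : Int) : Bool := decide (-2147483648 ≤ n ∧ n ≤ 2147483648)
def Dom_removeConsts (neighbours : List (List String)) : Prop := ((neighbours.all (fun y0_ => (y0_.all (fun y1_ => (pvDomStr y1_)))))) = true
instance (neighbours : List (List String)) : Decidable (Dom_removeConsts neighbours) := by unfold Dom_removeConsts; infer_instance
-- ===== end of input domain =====

-- B replaces A's repeated whole-string replace() fixpoint loop by a single-pass stack
-- that pops when the incoming move is the inverse of the stack top (objective: alternative algorithm).

-- ===== PORT A =====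
-- '"xy" in z' for a two-character pattern (hand port: PySem has no 2-char substring test on List Char; exact)
def pvContains2 (x y : Char) : List Char → Bool
  | a :: b :: rest => (a == x && b == y) || pvContains2 x y (b :: rest)
  | _ => false

-- 'z.replace("xy", "")' for a two-character pattern: removes non-overlapping occurrences
-- left to right, exactly as Python's str.replace with empty replacement does (hand port, exact)
def pvReplace2 (x y : Char) : List Char → List Char
  | a :: b :: rest => if a == x && b == y then pvReplace2 x y rest else a :: pvReplace2 x y (b :: rest)
  | l => l
termination_by l => l.length

-- the next three lemmas are cited by pvLoop's decreasing_by (termination of A's while loop)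
theorem pvReplace2_length_le (x y : Char) (l : List Char) :
    (pvReplace2 x y l).length ≤ l.length := by
  induction l using pvReplace2.induct x y with
  | case1 a b rest h ih =>
    rw [pvReplace2, if_pos h]
    simp only [List.length_cons]; omega
  | case2 a b rest h ih =>
    rw [pvReplace2, if_neg h]
    simp only [List.length_cons] at ih ⊢; omega
  | case3 l hl => simp [pvReplace2]

theorem pvReplace2_length_lt (x y : Char) (l : List Char) (h : pvContains2 x y l = true) :
    (pvReplace2 x y l).length < l.length := by
  induction l using pvReplace2.induct x y with
  | case1 a b rest hc ih =>
    have hle := pvReplace2_length_le x y rest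
    rw [pvReplace2, if_pos hc]
    simp only [List.length_cons]; omega
  | case2 a b rest hc ih =>
    have hcf : (a == x && b == y) = false := by simpa using hc
    simp only [pvContains2, hcf, Bool.false_or] at h
    have := ih h
    rw [pvReplace2, if_neg hc]
    simp only [List.length_cons] at this ⊢; omega
  | case3 l hl =>
    exfalso
    cases l with
    | nil => simp [pvContains2] at h
    | cons a tl =>
      cases tl with
      | nil => simp [pvContains2] at h
      | cons b rest => exact hl a b rest rfl

theorem pvReplace2_eq_of_not_contains (x y : Char) (l : List Char)
    (h : pvContains2 x y l = false) : pvReplace2 x y l = l := by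
  induction l using pvReplace2.induct x y with
  | case1 a b rest hc ih => simp [pvContains2, hc] at h
  | case2 a b rest hc ih =>
    have hcf : (a == x && b == y) = false := by simpa using hc
    simp only [pvContains2, hcf, Bool.false_or] at h
    rw [pvReplace2, if_neg hc, ih h]
  | case3 l hl =>
    cases l with
    | nil => simp [pvReplace2]
    | cons a tl =>
      cases tl with
      | nil => simp [pvReplace2]
      | cons b rest => exact absurd rfl (hl a b rest)

-- the while-condition of A
def pvCond (z : List Char) : Bool :=
  pvContains2 'U' 'D' z || pvContains2 'D' 'U' z || pvContains2 'L' 'R' z || pvContains2 'R' 'L' z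

-- one body of A's while loop: the four replaces in order
def pvStep (z : List Char) : List Char :=
  pvReplace2 'R' 'L' (pvReplace2 'L' 'R' (pvReplace2 'D' 'U' (pvReplace2 'U' 'D' z)))

theorem pvStep_lt (z : List Char) (h : pvCond z = true) : (pvStep z).length < z.length := by
  simp only [pvCond, Bool.or_eq_true] at h
  unfold pvStep
  by_cases h1 : pvContains2 'U' 'D' z = true
  · have := pvReplace2_length_lt 'U' 'D' z h1
    have := pvReplace2_length_le 'D' 'U' (pvReplace2 'U' 'D' z)
    have := pvReplace2_length_le 'L' 'R' (pvReplace2 'D' 'U' (pvReplace2 'U' 'D' z))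
    have := pvReplace2_length_le 'R' 'L' (pvReplace2 'L' 'R' (pvReplace2 'D' 'U' (pvReplace2 'U' 'D' z)))
    omega
  · rw [pvReplace2_eq_of_not_contains 'U' 'D' z (by simpa using h1)]
    by_cases h2 : pvContains2 'D' 'U' z = true
    · have := pvReplace2_length_lt 'D' 'U' z h2
      have := pvReplace2_length_le 'L' 'R' (pvReplace2 'D' 'U' z)
      have := pvReplace2_length_le 'R' 'L' (pvReplace2 'L' 'R' (pvReplace2 'D' 'U' z))
      omega
    · rw [pvReplace2_eq_of_not_contains 'D' 'U' z (by simpa using h2)]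
      by_cases h3 : pvContains2 'L' 'R' z = true
      · have := pvReplace2_length_lt 'L' 'R' z h3
        have := pvReplace2_length_le 'R' 'L' (pvReplace2 'L' 'R' z)
        omega
      · rw [pvReplace2_eq_of_not_contains 'L' 'R' z (by simpa using h3)]
        have h4 : pvContains2 'R' 'L' z = true := by tauto
        exact pvReplace2_length_lt 'R' 'L' z h4

-- A's while loop
def pvLoop (z : List Char) : List Char :=
  if h : pvCond z = true then pvLoop (pvStep z) else z
termination_by z.length
decreasing_by exact pvStep_lt z h

def removeConsts (neighbours : List (List String)) : List (List String) :=
  neighbours.map (fun n =>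
    (pvLoop ((n.map String.toList).flatten)).map (fun c => String.ofList [c]))

-- ===== PORT B =====
-- 'inv.get(stack[-1]) == ch' of Source B (the inverse-move table; false on every non-move character)
def pvInv (a b : Char) : Bool :=
  (a == 'U' && b == 'D') || (a == 'D' && b == 'U') || (a == 'L' && b == 'R') || (a == 'R' && b == 'L')

-- one iteration of Source B's inner for-loop; the stack is kept top-first, hence the final reverse
def pvPush (st : List Char) (c : Char) : List Char :=
  match st with
  | t :: rest => if pvInv t c then rest else c :: t :: rest
  | [] => [c]

def removeConsts_alt (neighbours : List (List String)) : List (List String) :=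
  neighbours.map (fun n =>
    ((((n.map String.toList).flatten).foldl pvPush []).reverse).map (fun c => String.ofList [c]))

-- ===== PRECONDITION & SPEC =====
def Spec_removeConsts (neighbours : List (List String)) (out : List (List String)) : Prop := out = removeConsts_alt neighbours
instance (neighbours : List (List String)) (out : List (List String)) : Decidable (Spec_removeConsts neighbours out) := by unfold Spec_removeConsts; infer_instance

-- ===== CLAIM (what is proved, stated in full; the proofs are below) =====
def Claim_equal_removeConsts : Prop := ∀ (neighbours : List (List String)), Dom_removeConsts neighbours → Spec_removeConsts neighbours (removeConsts neighbours)

-- ===== LEMMAS AND PROOFS =====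

theorem pvInv_symm {a b : Char} (h : pvInv a b = true) : pvInv b a = true := by
  simp only [pvInv, Bool.or_eq_true, Bool.and_eq_true, beq_iff_eq] at h ⊢
  tauto

theorem pvInv_symm_false {a b : Char} (h : pvInv a b = false) : pvInv b a = false := by
  by_contra hc
  have hba : pvInv b a = true := by revert hc; cases pvInv b a <;> simp
  have := pvInv_symm hba
  rw [h] at this; exact Bool.false_ne_true this

theorem pvInv_partner {t a b : Char} (h1 : pvInv t a = true) (h2 : pvInv a b = true) : b = t := by
  simp only [pvInv, Bool.or_eq_true, Bool.and_eq_true, beq_iff_eq] at h1 h2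
  obtain ⟨rfl, rfl⟩ | ⟨rfl, rfl⟩ | ⟨rfl, rfl⟩ | ⟨rfl, rfl⟩ := h1 <;>
    obtain ⟨h3, rfl⟩ | ⟨h3, rfl⟩ | ⟨h3, rfl⟩ | ⟨h3, rfl⟩ := h2 <;> simp_all

-- invariant: the stack built by pvPush never contains an adjacent inverse pair
def pvReduced (st : List Char) : Prop := List.IsChain (fun a b => pvInv a b = false) st

theorem pvReduced_push {st : List Char} (c : Char) (h : pvReduced st) : pvReduced (pvPush st c) := by
  unfold pvReduced pvPush
  cases st with
  | nil => exact List.IsChain.singleton c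
  | cons t rest =>
    by_cases hi : pvInv t c = true
    · simp only [hi, if_true]; exact (List.isChain_cons.mp h).2
    · have hif : pvInv t c = false := by simpa using hi
      simp only [hif, Bool.false_eq_true, if_false]
      exact List.isChain_cons_cons.mpr ⟨pvInv_symm_false hif, h⟩

theorem pvPush_push_cancel {a b : Char} (hab : pvInv a b = true) (st : List Char)
    (h : pvReduced st) : pvPush (pvPush st a) b = st := by
  cases st with
  | nil => simp [pvPush, hab]
  | cons t rest =>
    by_cases hta : pvInv t a = true
    · have hbt : b = t := pvInv_partner hta hab
      subst hbt
      simp only [pvPush, hta, if_true]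
      cases rest with
      | nil => rfl
      | cons s r =>
        have hts : pvInv b s = false := (List.isChain_cons_cons.mp h).1
        have hst : pvInv s b = false := pvInv_symm_false hts
        simp [hst]
    · have htaf : pvInv t a = false := by simpa using hta
      simp [pvPush, htaf, hab]

theorem pvFoldl_cancel {a b : Char} (hab : pvInv a b = true) :
    ∀ (u v st : List Char), pvReduced st →
      (u ++ a :: b :: v).foldl pvPush st = (u ++ v).foldl pvPush st := by
  intro u
  induction u with
  | nil =>
    intro v st h
    simp only [List.nil_append, List.foldl_cons]
    rw [pvPush_push_cancel hab st h]
  | cons c u' ih =>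
    intro v st h
    simp only [List.cons_append, List.foldl_cons]
    exact ih v (pvPush st c) (pvReduced_push c h)

theorem pvFoldl_replace2 {x y : Char} (hxy : pvInv x y = true) :
    ∀ (l st : List Char), pvReduced st →
      (pvReplace2 x y l).foldl pvPush st = l.foldl pvPush st := by
  intro l
  induction l using pvReplace2.induct x y with
  | case1 a b rest hc ih =>
    intro st h
    have ha : a = x := by simpa using (Bool.and_eq_true _ _ |>.mp hc).1
    have hb : b = y := by simpa using (Bool.and_eq_true _ _ |>.mp hc).2
    have hab : pvInv a b = true := by rw [ha, hb]; exact hxy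
    rw [pvReplace2, if_pos hc, ih st h]
    exact (pvFoldl_cancel hab [] rest st h).symm
  | case2 a b rest hc ih =>
    intro st h
    rw [pvReplace2, if_neg hc]
    simp only [List.foldl_cons]
    exact ih (pvPush st a) (pvReduced_push a h)
  | case3 l hl =>
    intro st h
    cases l with
    | nil => simp [pvReplace2]
    | cons a tl =>
      cases tl with
      | nil => simp [pvReplace2]
      | cons b rest => exact absurd rfl (hl a b rest)

theorem pvFoldl_step (z : List Char) :
    (pvStep z).foldl pvPush [] = z.foldl pvPush [] := by
  have hred : pvReduced ([] : List Char) := List.IsChain.nil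
  unfold pvStep
  rw [pvFoldl_replace2 (by decide) _ _ hred,
      pvFoldl_replace2 (by decide) _ _ hred,
      pvFoldl_replace2 (by decide) _ _ hred,
      pvFoldl_replace2 (by decide) _ _ hred]

theorem pvLoop_foldl (z : List Char) :
    (pvLoop z).foldl pvPush [] = z.foldl pvPush [] := by
  induction z using pvLoop.induct with
  | case1 z hc ih => rw [pvLoop, dif_pos hc, ih, pvFoldl_step]
  | case2 z hc => rw [pvLoop, dif_neg hc]

theorem pvLoop_cond (z : List Char) : pvCond (pvLoop z) = false := by
  induction z using pvLoop.induct with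
  | case1 z hc ih => rw [pvLoop, dif_pos hc]; exact ih
  | case2 z hc => rw [pvLoop, dif_neg hc]; simpa using hc

theorem pvCond_tail {a : Char} {z : List Char} (h : pvCond (a :: z) = false) :
    pvCond z = false := by
  cases z with
  | nil => rfl
  | cons b rest =>
    simp only [pvCond, pvContains2, Bool.or_eq_false_iff] at h ⊢
    tauto

theorem pvCond_false_chain (z : List Char) (h : pvCond z = false) :
    List.IsChain (fun a b => pvInv a b = false) z := by
  induction z with
  | nil => exact List.IsChain.nil
  | cons a tl ih =>
    cases tl with
    | nil => exact List.IsChain.singleton a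
    | cons b rest =>
      refine List.isChain_cons_cons.mpr ⟨?_, ih (pvCond_tail h)⟩
      simp only [pvCond, pvContains2, Bool.or_eq_false_iff, Bool.and_eq_false_iff] at h
      simp only [pvInv, Bool.or_eq_false_iff, Bool.and_eq_false_iff]
      tauto

theorem pvFoldl_chain :
    ∀ (z st : List Char), List.IsChain (fun a b => pvInv a b = false) z →
      (∀ t c, st.head? = some t → z.head? = some c → pvInv t c = false) →
      z.foldl pvPush st = z.reverse ++ st := by
  intro z
  induction z with
  | nil => intro st _ _; simp
  | cons c cs ih =>
    intro st hch hhd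
    have hpush : pvPush st c = c :: st := by
      cases st with
      | nil => rfl
      | cons t r =>
        have := hhd t c rfl rfl
        simp [pvPush, this]
    rw [List.foldl_cons, hpush, ih (c :: st) (List.isChain_cons.mp hch).2 ?_]
    · simp
    · intro t d ht hd
      simp only [List.head?_cons, Option.some.injEq] at ht
      subst ht
      cases cs with
      | nil => simp at hd
      | cons d' rest =>
        simp only [List.head?_cons, Option.some.injEq] at hd
        subst hd
        exact (List.isChain_cons_cons.mp hch).1

theorem pvLoop_eq_stack (z : List Char) :
    pvLoop z = (z.foldl pvPush []).reverse := by
  have h3 := pvFoldl_chain (pvLoop z) [] (pvCond_false_chain _ (pvLoop_cond z))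
    (by intro t c ht _; simp at ht)
  rw [← pvLoop_foldl z, h3]
  simp

-- ===== VERDICT (by name: the statement is the Claim_ definition above) =====
theorem removeConsts_spec : Claim_equal_removeConsts := by
  intro neighbours _
  unfold Spec_removeConsts removeConsts removeConsts_alt
  simp [pvLoop_eq_stack]
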